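-- pv_equiv track=rewrite | github.com/bahe007/ZeroCovid | helpers.py | green_zone_durations
-- ===== SOURCE A (Python) =====
-- def green_zone_durations(f):
--     """Ermittelt, wie lange (potentiell mehrere) Klassifikationen als grüne Zone andauerten
--
--     Parameter
--     ---------
--     `f` ist die Ausgabe von `classify_red_green_threshold`.
--
--     Returns
--     -------
--     Eine Liste mit den Dauern der Green-Zone in Tagen.
--     """
--     durations = []
--     cur_duration = 0
--     for t in range(len(f)):
--         if f[t] != 0:
--             if cur_duration > 0:
--                 durations.append(cur_duration)
--
--             cur_duration = 0
--
--         else: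
--             cur_duration += 1
--
--     return durations
-- ===== SOURCE B (Python) =====
-- def green_zone_durations(f):
--     # Materialize consecutive-equal runs (run-length encoding), then keep the
--     # lengths of zero-valued runs, counting only green zones that have ended
--     # (a trailing zero run is still ongoing, so it is not counted).
--     groups = []
--     i = 0
--     n = len(f)
--     while i < n:
--         j = i
--         while j < n and f[j] == f[i]:
--             j += 1
--         groups.append((f[i], j - i))
--         i = j
--     return [c for idx, (k, c) in enumerate(groups) if k == 0 and idx != len(groups) - 1]
-- ===== Notes on version B (the rewrite author's own statement) =====
-- stated objective: idiomatic
-- what changed: B first materializes the list of consecutive-equal runs (run-length encoding) and then filters it for ended zero runs, instead of A's single pass with a pending-counter that is appended when a nonzero element arrives.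
import Mathlib
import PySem

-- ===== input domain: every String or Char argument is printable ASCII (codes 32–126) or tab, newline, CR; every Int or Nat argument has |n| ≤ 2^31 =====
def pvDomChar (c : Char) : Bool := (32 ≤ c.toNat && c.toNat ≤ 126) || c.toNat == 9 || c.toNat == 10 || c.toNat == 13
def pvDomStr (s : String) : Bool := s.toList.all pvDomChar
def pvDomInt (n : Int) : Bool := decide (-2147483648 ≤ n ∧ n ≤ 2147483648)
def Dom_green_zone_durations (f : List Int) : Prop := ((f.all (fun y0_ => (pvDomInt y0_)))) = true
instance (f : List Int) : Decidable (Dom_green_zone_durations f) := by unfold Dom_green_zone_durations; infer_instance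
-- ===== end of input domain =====

-- B builds the run-length encoding of f and filters it; A keeps a pending counter.

-- ===== PORT A =====
-- fold state: (durations, cur_duration); the loop body follows A's branches in order
def pvStepA (s : List Int × Int) (t : Int) : List Int × Int :=
  if t ≠ 0 then
    (if s.2 > 0 then s.1 ++ [s.2] else s.1, 0)
  else
    (s.1, s.2 + 1)

def green_zone_durations (f : List Int) : List Int :=
  (f.foldl pvStepA ([], 0)).1

-- ===== PORT B =====
-- run-length encoding of f (B's inner while loop scans the run of elements equal to f[i])
def pvGroupsOf (f : List Int) : List (Int × Int) :=
  match f with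
  | [] => []
  | x :: xs =>
      (x, 1 + ((xs.takeWhile (fun y => y == x)).length : Int)) ::
        pvGroupsOf (xs.dropWhile (fun y => y == x))
termination_by f.length
decreasing_by
  exact Nat.lt_succ_of_le (List.length_dropWhile_le _ _)

def green_zone_durations_alt (f : List Int) : List Int :=
  let groups := pvGroupsOf f
  ((PySem.List.enumerate groups).filter
      (fun p => p.2.1 == 0 && decide (p.1 ≠ (groups.length : Int) - 1))).map (fun p => p.2.2)

-- ===== PRECONDITION & SPEC =====
def Spec_green_zone_durations (f : List Int) (out : List Int) : Prop := out = green_zone_durations_alt f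
instance (f : List Int) (out : List Int) : Decidable (Spec_green_zone_durations f out) := by unfold Spec_green_zone_durations; infer_instance

-- ===== CLAIM (what is proved, stated in full; the proofs are below) =====
def Claim_equal_green_zone_durations : Prop := ∀ (f : List Int), Dom_green_zone_durations f → Spec_green_zone_durations f (green_zone_durations f)

-- ===== LEMMAS AND PROOFS =====

-- mid-level recursive specification: A's loop with explicit pending counter c
def pvSpecAux (c : Int) : List Int → List Int
  | [] => []
  | t :: ts => if t ≠ 0 then (if c > 0 then c :: pvSpecAux 0 ts else pvSpecAux 0 ts)
               else pvSpecAux (c + 1) ts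

-- drop-the-last-group filter, recursively
def pvG : List (Int × Int) → List Int
  | [] => []
  | (k, n) :: rest => if rest = [] then [] else (if k = 0 then n :: pvG rest else pvG rest)

theorem pvA_eq_spec (f : List Int) (ds : List Int) (c : Int) :
    (f.foldl pvStepA (ds, c)).1 = ds ++ pvSpecAux c f := by
  induction f generalizing ds c with
  | nil => simp [pvSpecAux]
  | cons t ts ih =>
      rw [List.foldl_cons]
      by_cases ht : t ≠ 0
      · rw [show pvStepA (ds, c) t = (if c > 0 then ds ++ [c] else ds, 0) from by
          simp [pvStepA, ht]]
        simp only [pvSpecAux, if_pos ht]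
        by_cases hc : c > 0
        · rw [if_pos hc, if_pos hc, ih, List.append_assoc]; rfl
        · rw [if_neg hc, if_neg hc, ih]
      · rw [show pvStepA (ds, c) t = (ds, c + 1) from by simp [pvStepA, ht]]
        simp only [pvSpecAux, if_neg ht]
        exact ih ds (c + 1)

theorem pvSpec_skip_nonzero (run rest : List Int) (h : ∀ a ∈ run, a ≠ 0) :
    pvSpecAux 0 (run ++ rest) = pvSpecAux 0 rest := by
  induction run with
  | nil => rfl
  | cons a run ih =>
      have ha : a ≠ 0 := h a (List.mem_cons_self ..)
      rw [List.cons_append]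
      simp only [pvSpecAux, if_pos ha, if_neg (show ¬ (0:Int) > 0 by omega)]
      exact ih (fun b hb => h b (List.mem_cons_of_mem _ hb))

theorem pvSpec_zeros (run : List Int) (rest : List Int) (c : Int) (h : ∀ a ∈ run, a = 0) :
    pvSpecAux c (run ++ rest) = pvSpecAux (c + run.length) rest := by
  induction run generalizing c with
  | nil => simp
  | cons a run ih =>
      have ha : a = 0 := h a (List.mem_cons_self ..)
      subst ha
      rw [List.cons_append]
      simp only [pvSpecAux, if_neg (show ¬ ((0:Int) ≠ 0) by simp)]
      rw [ih (c + 1) (fun b hb => h b (List.mem_cons_of_mem _ hb))]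
      congr 1
      push_cast [List.length_cons]
      ring

theorem pvG_groups (N : Nat) : ∀ f : List Int, f.length ≤ N → pvG (pvGroupsOf f) = pvSpecAux 0 f := by
  induction N with
  | zero =>
      intro f hf
      have : f = [] := List.eq_nil_of_length_eq_zero (Nat.le_zero.mp hf)
      subst this
      simp [pvGroupsOf, pvG, pvSpecAux]
  | succ N ih =>
      intro f hf
      match f with
      | [] => simp [pvGroupsOf, pvG, pvSpecAux]
      | x :: xs =>
        have hlen2 : xs.length ≤ N := by simpa using Nat.succ_le_succ_iff.mp hf
        have hrunmem : ∀ a ∈ xs.takeWhile (fun y => y == x), a = x := by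
          intro a ha
          simpa using List.mem_takeWhile_imp ha
        have hx : x :: xs =
            (x :: xs.takeWhile (fun y => y == x)) ++ xs.dropWhile (fun y => y == x) := by
          simp [List.takeWhile_append_dropWhile]
        have hlenrest : (xs.dropWhile (fun y => y == x)).length ≤ N :=
          le_trans (List.length_dropWhile_le _ _) hlen2
        rw [pvGroupsOf.eq_def]
        simp only []
        rcases hdrop : xs.dropWhile (fun y => y == x) with _ | ⟨y, rest'⟩
        · -- the whole list is one run of x
          rw [hdrop] at hx
          by_cases hx0 : x = 0
          · subst hx0
            have hz : ∀ a ∈ (0 : Int) :: xs.takeWhile (fun y => y == (0:Int)), a = 0 := by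
              intro a ha
              rcases List.mem_cons.mp ha with h | h
              · exact h
              · exact hrunmem a h
            conv_rhs => rw [hx]
            rw [pvSpec_zeros _ _ _ hz]
            simp [pvGroupsOf, pvG, pvSpecAux]
          · have hnz : ∀ a ∈ x :: xs.takeWhile (fun y => y == x), a ≠ 0 := by
              intro a ha
              rcases List.mem_cons.mp ha with h | h
              · exact h ▸ hx0
              · exact (hrunmem a h) ▸ hx0
            conv_rhs => rw [hx]
            rw [pvSpec_skip_nonzero _ _ hnz]
            simp [pvGroupsOf, pvG, pvSpecAux]
        · rw [hdrop] at hx hlenrest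
          have hy : y ≠ x := by
            have := List.head_dropWhile_not (fun y => y == x) (l := xs)
            rw [hdrop] at this
            simpa using this (by simp)
          have hne : pvGroupsOf (y :: rest') ≠ [] := by
            rw [pvGroupsOf.eq_def]; simp
          by_cases hx0 : x = 0
          · subst hx0
            have hz : ∀ a ∈ (0 : Int) :: xs.takeWhile (fun y => y == (0:Int)), a = 0 := by
              intro a ha
              rcases List.mem_cons.mp ha with h | h
              · exact h
              · exact hrunmem a h
            conv_rhs => rw [hx]
            rw [pvSpec_zeros _ _ _ hz]
            simp only [pvG, if_neg hne]
            rw [ih _ hlenrest]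
            simp only [pvSpecAux, if_pos hy, List.length_cons, if_true]
            rw [if_neg (show ¬ (0:Int) > 0 by omega)]
            rw [if_pos (show (0:Int) + ((((xs.takeWhile (fun y => y == (0:Int))).length + 1 : Nat)) : Int) > 0 by positivity)]
            congr 1
            push_cast
            ring
          · have hnz : ∀ a ∈ x :: xs.takeWhile (fun y => y == x), a ≠ 0 := by
              intro a ha
              rcases List.mem_cons.mp ha with h | h
              · exact h ▸ hx0
              · exact (hrunmem a h) ▸ hx0
            conv_rhs => rw [hx]
            rw [pvSpec_skip_nonzero _ _ hnz, ← ih _ hlenrest]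
            simp [pvG, hne, hx0]

theorem pvFilter_eq_pvG (gs : List (Int × Int)) (s : Int) (L : Int)
    (hL : s + (gs.length : Int) = L) :
    ((PySem.List.enumerate gs s).filter
        (fun p => p.2.1 == 0 && decide (p.1 ≠ L - 1))).map (fun p => p.2.2) = pvG gs := by
  induction gs generalizing s with
  | nil => rfl
  | cons g rest ih =>
      obtain ⟨k, n⟩ := g
      rw [PySem.List.enumerate_cons, List.filter_cons]
      by_cases hrest0 : rest = []
      · subst hrest0
        have hs : s = L - 1 := by simp at hL; omega
        simp [pvG, hs, PySem.List.enumerate]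
      · have hlen : 1 ≤ (rest.length : Int) := by
          exact_mod_cast List.length_pos_iff.mpr hrest0
        have hs : s ≠ L - 1 := by
          simp only [List.length_cons] at hL
          push_cast at hL
          omega
        have hih := ih (s + 1) (by
          simp only [List.length_cons] at hL
          push_cast at hL ⊢
          omega)
        by_cases hk : k = 0
        · rw [if_pos (by simp [hk, hs])]
          rw [List.map_cons, hih]
          simp [pvG, hrest0, hk]
        · rw [if_neg (by simp [hk])]
          rw [hih]
          simp [pvG, hrest0, hk]

-- ===== VERDICT (by name: the statement is the Claim_ definition above) =====
theorem green_zone_durations_spec : Claim_equal_green_zone_durations := by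
  intro f _
  show green_zone_durations f = green_zone_durations_alt f
  rw [green_zone_durations, pvA_eq_spec, green_zone_durations_alt]
  rw [pvFilter_eq_pvG (pvGroupsOf f) 0 (pvGroupsOf f).length (by omega)]
  rw [pvG_groups f.length f (le_refl _)]
  simp
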